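-- pv_equiv track=rewrite | github.com/Ublyudok-kun/reversi | deshacerJugadas.py | deshacer_arriba
-- ===== SOURCE A (Python) =====
-- def deshacer_arriba(tablero, x, y, xf, yf, turno, dimension):
--     if (x > 0 and x < dimension):
--         try:
--             # arriba
--             if ((y == yf) and (x > xf+1)):
--                 tablero[x-1][y] = turno*-1
--                 deshacer_arriba(tablero, x-1, y, xf, yf, turno, dimension)
--             else:
--                 return tablero
--         except:
--             IndexError
--     return tablero
-- ===== SOURCE B (Python) =====
-- def deshacer_arriba(tablero, x, y, xf, yf, turno, dimension):
--     # Flip column y upward, rows x-1 down to row xf+1 (never below row 0);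
--     # an out-of-board access just stops the walk.
--     if 0 < x < dimension and y == yf:
--         try:
--             for r in range(x - 1, max(xf, -1), -1):
--                 tablero[r][y] = turno * -1
--         except IndexError:
--             pass
--     return tablero
-- ===== Notes on version B (the rewrite author's own statement) =====
-- stated objective: simpler
-- what changed: Replaces A's per-step recursion (each call re-testing the guards and flipping one cell under a bare try/except) by a single for-loop over the precomputed row range with one try/except IndexError around the loop.
import Mathlib
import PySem

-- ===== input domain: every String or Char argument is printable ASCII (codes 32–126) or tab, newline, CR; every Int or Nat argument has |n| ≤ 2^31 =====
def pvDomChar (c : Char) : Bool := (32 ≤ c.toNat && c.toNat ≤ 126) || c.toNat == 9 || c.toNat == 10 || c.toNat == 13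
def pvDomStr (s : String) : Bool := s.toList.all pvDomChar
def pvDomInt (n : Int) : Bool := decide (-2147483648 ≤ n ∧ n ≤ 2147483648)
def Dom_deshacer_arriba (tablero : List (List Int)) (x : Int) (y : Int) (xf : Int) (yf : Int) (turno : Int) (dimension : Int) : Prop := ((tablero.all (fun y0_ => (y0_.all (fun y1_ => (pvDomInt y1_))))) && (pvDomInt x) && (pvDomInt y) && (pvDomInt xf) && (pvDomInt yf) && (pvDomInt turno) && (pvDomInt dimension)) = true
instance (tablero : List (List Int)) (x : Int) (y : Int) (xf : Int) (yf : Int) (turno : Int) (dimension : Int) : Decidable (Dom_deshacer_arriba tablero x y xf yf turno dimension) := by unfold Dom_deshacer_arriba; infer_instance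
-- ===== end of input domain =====

-- B replaces A's per-step recursion with one for-loop over the precomputed row range
-- under a single try/except IndexError (simpler decomposition, same cost). Both
-- Pythons mutate `tablero` in place identically and return it; the equivalence
-- proved here is about the returned board value.

-- ===== PORT A =====
-- Literal port of A's recursion: the bare try/except around the flip becomes the
-- `none` branches of pyGet?/pySet? (IndexError swallowed, then `return tablero`).
def deshacer_arriba (tablero : List (List Int)) (x : Int) (y : Int) (xf : Int) (yf : Int) (turno : Int) (dimension : Int) : List (List Int) :=
  if 0 < x ∧ x < dimension then
    if y = yf ∧ xf + 1 < x then
      match PySem.List.pyGet? tablero (x - 1) with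
      | none => tablero
      | some row =>
        match PySem.List.pySet? row y (turno * -1) with
        | none => tablero
        | some row' =>
          deshacer_arriba (PySem.List.pySetD tablero (x - 1) row') (x - 1) y xf yf turno dimension
    else tablero
  else tablero
termination_by x.toNat
decreasing_by omega

-- ===== PORT B =====
-- B's loop body: `tablero[r][y] = turno*-1` over the row list; the first IndexError
-- (pyGet?/pySet? = none) aborts the loop, returning the board built so far.
def pvFlipRows (y v : Int) : List Int → List (List Int) → List (List Int)
  | [], t => t
  | r :: rs, t =>
    match PySem.List.pyGet? t r with
    | none => t
    | some row =>
      match PySem.List.pySet? row y v with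
      | none => t
      | some row' => pvFlipRows y v rs (PySem.List.pySetD t r row')

def deshacer_arriba_alt (tablero : List (List Int)) (x : Int) (y : Int) (xf : Int) (yf : Int) (turno : Int) (dimension : Int) : List (List Int) :=
  if 0 < x ∧ x < dimension ∧ y = yf then
    pvFlipRows y (turno * -1) (PySem.List.pyRange (x - 1) (max xf (-1)) (-1)) tablero
  else tablero

-- ===== PRECONDITION & SPEC =====
def Spec_deshacer_arriba (tablero : List (List Int)) (x : Int) (y : Int) (xf : Int) (yf : Int) (turno : Int) (dimension : Int) (out : List (List Int)) : Prop := out = deshacer_arriba_alt tablero x y xf yf turno dimension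
instance (tablero : List (List Int)) (x : Int) (y : Int) (xf : Int) (yf : Int) (turno : Int) (dimension : Int) (out : List (List Int)) : Decidable (Spec_deshacer_arriba tablero x y xf yf turno dimension out) := by unfold Spec_deshacer_arriba; infer_instance

-- ===== CLAIM (what is proved, stated in full; the proofs are below) =====
def Claim_equal_deshacer_arriba : Prop := ∀ (tablero : List (List Int)) (x : Int) (y : Int) (xf : Int) (yf : Int) (turno : Int) (dimension : Int), Dom_deshacer_arriba tablero x y xf yf turno dimension → Spec_deshacer_arriba tablero x y xf yf turno dimension (deshacer_arriba tablero x y xf yf turno dimension)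

-- ===== LEMMAS AND PROOFS =====

-- A's recursion, started inside its guard, performs exactly B's loop over the range.
lemma deshacer_main (y xf yf turno dimension : Int) : ∀ (n : Nat) (x : Int) (t : List (List Int)), x.toNat ≤ n → 0 < x → x < dimension → y = yf →
    deshacer_arriba t x y xf yf turno dimension
      = pvFlipRows y (turno * -1) (PySem.List.pyRange (x - 1) (max xf (-1)) (-1)) t := by
  intro n
  induction n with
  | zero => intro x t hn hx _ _; omega
  | succ n ih =>
    intro x t hn hx hdim hy
    rw [deshacer_arriba]
    by_cases hgt : xf + 1 < x
    · rw [if_pos (⟨hx, hdim⟩ : 0 < x ∧ x < dimension), if_pos (⟨hy, hgt⟩ : y = yf ∧ xf + 1 < x),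
        PySem.List.pyRange_neg_one_cons (by omega : max xf (-1) < x - 1)]
      simp only [pvFlipRows]
      split
      · rfl
      · rename_i row hget
        split
        · rfl
        · rename_i row' hset
          by_cases hx1 : 0 < x - 1
          · exact ih (x - 1) _ (by omega) hx1 (by omega) hy
          · rw [deshacer_arriba, if_neg (by omega : ¬(0 < x - 1 ∧ x - 1 < dimension)),
              PySem.List.pyRange_neg_one_eq_nil (by omega : x - 1 - 1 ≤ max xf (-1))]
            rfl
    · rw [if_pos (⟨hx, hdim⟩ : 0 < x ∧ x < dimension), if_neg (by tauto : ¬(y = yf ∧ xf + 1 < x)),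
        PySem.List.pyRange_neg_one_eq_nil (by omega : x - 1 ≤ max xf (-1))]
      rfl

-- ===== VERDICT (by name: the statement is the Claim_ definition above) =====
theorem deshacer_arriba_spec : Claim_equal_deshacer_arriba := by
  intro tablero x y xf yf turno dimension _
  unfold Spec_deshacer_arriba deshacer_arriba_alt
  by_cases hg : 0 < x ∧ x < dimension ∧ y = yf
  · rw [if_pos hg]
    exact deshacer_main y xf yf turno dimension x.toNat x tablero le_rfl hg.1 hg.2.1 hg.2.2
  · rw [if_neg hg, deshacer_arriba]
    by_cases h1 : 0 < x ∧ x < dimension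
    · rw [if_pos h1, if_neg (by tauto : ¬(y = yf ∧ xf + 1 < x))]
    · rw [if_neg h1]
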